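-- pv_equiv track=rewrite | github.com/hark130/Gamemaster_Guidance | gamemaster_guidance/gg_city.py | _find_a_citizen
-- ===== SOURCE A (Python) =====
-- def _find_a_citizen(classDictList, citizenNum, minLevel=1):
--     # LOCAL VARIABLES
--     localClass = None  # Random citizen's class
--     localLevel = None  # Random citizen's level
--     localCitNum = citizenNum  # Local copy of citizenNum to decrement
--
--     # FIND THE CITIZEN
--     for classDict in classDictList:
--         for value in classDict.values():
--             for (level, number) in value["Dict"].items():
--                 if level >= minLevel and number > 0:
--                     if localCitNum <= number:
--                         localClass = list(classDict.keys())[0]  # Class name is the only key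
--                         localLevel = level
--                         return tuple((localClass, localLevel))
--                     else:
--                         localCitNum -= number
--
--     raise RuntimeError(f'Unable to find citizen number {citizenNum} of '
--                        f'minimum level {minLevel}')
-- ===== SOURCE B (Python) =====
-- def _find_a_citizen(classDictList, citizenNum, minLevel=1):
--     # Stage 1: materialize the prefix-sum table of qualifying buckets:
--     # rows of (cumulative_end, class_name, level), in original iteration order.
--     rows = []
--     total = 0
--     for classDict in classDictList:
--         class_name = next(iter(classDict), None)  # class name is the only key
--         for value in classDict.values():
--             for level, number in value.get("Dict", {}).items():
--                 if level >= minLevel and number > 0: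
--                     total += number
--                     rows.append((total, class_name, level))
--     # Stage 2: binary search for the first row whose cumulative end reaches
--     # citizenNum (cumulative ends are strictly increasing: every number > 0).
--     lo, hi = 0, len(rows)
--     while lo < hi:
--         mid = (lo + hi) // 2
--         if rows[mid][0] < citizenNum:
--             lo = mid + 1
--         else:
--             hi = mid
--     if lo < len(rows):
--         _, class_name, level = rows[lo]
--         return (class_name, level)
--     raise RuntimeError(f'Unable to find citizen number {citizenNum} of '
--                        f'minimum level {minLevel}')
-- ===== Notes on version B (the rewrite author's own statement) =====
-- stated objective: alternative
-- what changed: Replaces A's decrement-a-counter descent that returns from inside the triple loop by two stages: first materialize the prefix-sum table of qualifying buckets as (cumulative_end, class, level) rows, then BINARY-SEARCH that table for the first row whose cumulative end reaches citizenNum (correct because every counted number is > 0, so cumulative ends are strictly increasing).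
import Mathlib
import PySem

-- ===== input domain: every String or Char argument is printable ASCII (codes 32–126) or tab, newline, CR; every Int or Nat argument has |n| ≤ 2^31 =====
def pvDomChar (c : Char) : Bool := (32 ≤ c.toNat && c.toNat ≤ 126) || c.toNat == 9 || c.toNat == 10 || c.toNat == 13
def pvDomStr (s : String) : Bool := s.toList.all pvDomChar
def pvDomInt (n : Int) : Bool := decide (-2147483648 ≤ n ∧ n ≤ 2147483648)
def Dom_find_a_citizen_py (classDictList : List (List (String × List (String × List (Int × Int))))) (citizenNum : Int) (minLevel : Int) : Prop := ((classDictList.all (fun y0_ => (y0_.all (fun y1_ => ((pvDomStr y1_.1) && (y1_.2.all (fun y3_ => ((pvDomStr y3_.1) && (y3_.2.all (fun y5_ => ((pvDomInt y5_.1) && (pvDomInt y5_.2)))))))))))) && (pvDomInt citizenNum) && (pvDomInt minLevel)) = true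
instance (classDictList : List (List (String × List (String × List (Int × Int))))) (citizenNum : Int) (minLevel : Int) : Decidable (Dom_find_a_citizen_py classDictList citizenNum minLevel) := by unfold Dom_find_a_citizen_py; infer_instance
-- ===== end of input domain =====

-- B replaces A's decrement-a-counter descent (returning from inside the triple loop) by two
-- stages: materialize the prefix-sum table of qualifying buckets, then BINARY-SEARCH it for
-- the first cumulative end reaching citizenNum (objective: alternative algorithm).
-- Return-value equivalence only; neither version mutates its arguments.

-- ===== PORT A =====
-- inner loop over value["Dict"].items(): .inl = returned citizen, .inr = decremented counter
def aItems (fk : String) (minLevel : Int) : List (Int × Int) → Int → Sum (String × Int) Int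
  | [], c => .inr c
  | (level, number) :: rest, c =>
    if minLevel ≤ level ∧ 0 < number then
      if c ≤ number then .inl (fk, level)
      else aItems fk minLevel rest (c - number)
    else aItems fk minLevel rest c

-- loop over classDict.values(); value["Dict"] missing = KeyError = .inl none (A raises there)
def aEntries (fk : String) (minLevel : Int) : List (String × List (String × List (Int × Int))) → Int → Sum (Option (String × Int)) Int
  | [], c => .inr c
  | (_, v) :: rest, c =>
    match v.lookup "Dict" with
    | none => .inl none
    | some items =>
      match aItems fk minLevel items c with
      | .inl r => .inl (some r)
      | .inr c' => aEntries fk minLevel rest c'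

-- outer loop over classDictList; fk = list(classDict.keys())[0] (only read when a citizen is returned)
def aOuter (minLevel : Int) : List (List (String × List (String × List (Int × Int)))) → Int → Option (String × Int)
  | [], _ => none
  | d :: rest, c =>
    match aEntries (d.headD ("", [])).1 minLevel d c with
    | .inl r => r
    | .inr c' => aOuter minLevel rest c'

-- none = the function raises (RuntimeError / KeyError); Pre_ excludes those inputs, default unused there
def find_a_citizen_py (classDictList : List (List (String × List (String × List (Int × Int))))) (citizenNum : Int) (minLevel : Int) : String × Int :=
  (aOuter minLevel classDictList citizenNum).getD ("", 0)

-- ===== PORT B =====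
-- Stage 1 of Source B: the three materializing loops building rows of (cumulative_end, class, level);
-- value.get("Dict", {}) is ported exactly by (lookup "Dict").getD [].
def bItems (cn : String) (minLevel : Int) : List (Int × Int) → Int × List (Int × String × Int) → Int × List (Int × String × Int)
  | [], st => st
  | (level, number) :: rest, (t, acc) =>
    if minLevel ≤ level ∧ 0 < number then
      bItems cn minLevel rest (t + number, acc ++ [(t + number, cn, level)])
    else bItems cn minLevel rest (t, acc)

def bEntries (cn : String) (minLevel : Int) : List (String × List (String × List (Int × Int))) → Int × List (Int × String × Int) → Int × List (Int × String × Int)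
  | [], st => st
  | (_, v) :: rest, st =>
    bEntries cn minLevel rest (bItems cn minLevel ((v.lookup "Dict").getD []) st)

def bBuild (minLevel : Int) : List (List (String × List (String × List (Int × Int)))) → Int × List (Int × String × Int) → Int × List (Int × String × Int)
  | [], st => st
  | d :: rest, st =>
    bBuild minLevel rest (bEntries (d.headD ("", [])).1 minLevel d st)

-- Stage 2 of Source B: the while-loop binary search (lo, hi halving on rows[mid][0] < citizenNum)
def bSearch (rows : List (Int × String × Int)) (c : Int) (lo hi : Nat) : Nat :=
  if _h : lo < hi then
    if (rows.getD ((lo + hi) / 2) (0, "", 0)).1 < c then bSearch rows c ((lo + hi) / 2 + 1) hi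
    else bSearch rows c lo ((lo + hi) / 2)
  else lo
termination_by hi - lo
decreasing_by all_goals omega

def find_a_citizen_py_alt (classDictList : List (List (String × List (String × List (Int × Int))))) (citizenNum : Int) (minLevel : Int) : String × Int :=
  let rows := (bBuild minLevel classDictList (0, [])).2
  let lo := bSearch rows citizenNum 0 rows.length
  if lo < rows.length then (rows.getD lo (0, "", 0)).2 else ("", 0)

-- ===== PRECONDITION & SPEC =====
-- helpers for Pre_ (independent of both ports)
-- the flat stream of values: (first key of its classDict, value["Dict"] if present)
def evList (cdl : List (List (String × List (String × List (Int × Int))))) : List (String × Option (List (Int × Int))) :=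
  cdl.flatMap (fun d => d.map (fun p => ((d.headD ("", [])).1, p.2.lookup "Dict")))

-- qualifying buckets of one value, tagged with its class name
def qOf (fk : String) (minLevel : Int) (items : List (Int × Int)) : List (String × Int × Int) :=
  (items.filter (fun b => minLevel ≤ b.1 ∧ 0 < b.2)).map (fun b => (fk, b.1, b.2))

def qOfE (minLevel : Int) (es : List (String × Option (List (Int × Int)))) : List (String × Int × Int) :=
  es.flatMap (fun e => qOf e.1 minLevel (e.2.getD []))

def qSum (qs : List (String × Int × Int)) : Int := (qs.map (·.2.2)).sum

-- Pre_ = exactly the inputs on which the Python A returns: some prefix of the value stream has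
-- every "Dict" key present (no KeyError before the citizen is found), contains a qualifying
-- bucket, and its qualifying total reaches citizenNum (so the citizen is found inside it;
-- otherwise A raises KeyError or RuntimeError).
def Pre_find_a_citizen_py (classDictList : List (List (String × List (String × List (Int × Int))))) (citizenNum : Int) (minLevel : Int) : Prop :=
  ∃ i ∈ List.range (evList classDictList).length,
    (∀ e ∈ (evList classDictList).take (i + 1), e.2.isSome) ∧
    (∃ e ∈ (evList classDictList).take (i + 1), ∃ b ∈ e.2.getD [], minLevel ≤ b.1 ∧ 0 < b.2) ∧
    citizenNum ≤ qSum (qOfE minLevel ((evList classDictList).take (i + 1)))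
instance (classDictList : List (List (String × List (String × List (Int × Int))))) (citizenNum : Int) (minLevel : Int) : Decidable (Pre_find_a_citizen_py classDictList citizenNum minLevel) := by unfold Pre_find_a_citizen_py; infer_instance

def pvWitness_find_a_citizen_py : (List (List (String × List (String × List (Int × Int))))) × Int × Int :=
  ([[("Fighter", [("Dict", [(1, 5)])])], [("Rogue", [("Dict", [(2, 3)])])]], 7, 1)

def Spec_find_a_citizen_py (classDictList : List (List (String × List (String × List (Int × Int))))) (citizenNum : Int) (minLevel : Int) (out : String × Int) : Prop := out = find_a_citizen_py_alt classDictList citizenNum minLevel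
instance (classDictList : List (List (String × List (String × List (Int × Int))))) (citizenNum : Int) (minLevel : Int) (out : String × Int) : Decidable (Spec_find_a_citizen_py classDictList citizenNum minLevel out) := by unfold Spec_find_a_citizen_py; infer_instance

-- ===== CLAIM (what is proved, stated in full; the proofs are below) =====
def Claim_equal_find_a_citizen_py : Prop := ∀ (classDictList : List (List (String × List (String × List (Int × Int))))) (citizenNum : Int) (minLevel : Int), Dom_find_a_citizen_py classDictList citizenNum minLevel → Pre_find_a_citizen_py classDictList citizenNum minLevel → Spec_find_a_citizen_py classDictList citizenNum minLevel (find_a_citizen_py classDictList citizenNum minLevel)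

-- ===== LEMMAS AND PROOFS =====
-- reference semantics: decrementing scan of a flat bucket list
def scanQ : List (String × Int × Int) → Int → Option (String × Int)
  | [], _ => none
  | (cn, l, n) :: rest, c => if c ≤ n then some (cn, l) else scanQ rest (c - n)

-- reference semantics of A over the value stream (.inl none = KeyError, .inl some = found)
def runE (minLevel : Int) : List (String × Option (List (Int × Int))) → Int → Sum (Option (String × Int)) Int
  | [], c => .inr c
  | (_, none) :: _, _ => .inl none
  | (fk, some items) :: rest, c =>
    match scanQ (qOf fk minLevel items) c with
    | some r => .inl (some r)
    | none => runE minLevel rest (c - qSum (qOf fk minLevel items))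

-- proof-side linear first-match scan of the prefix table
def bScan (citizenNum : Int) : List (Int × String × Int) → Option (String × Int)
  | [] => none
  | (cumEnd, cn, level) :: rest =>
    if citizenNum ≤ cumEnd then some (cn, level) else bScan citizenNum rest

theorem qOfE_cons (minLevel : Int) (e : String × Option (List (Int × Int))) (es : List (String × Option (List (Int × Int)))) :
    qOfE minLevel (e :: es) = qOf e.1 minLevel (e.2.getD []) ++ qOfE minLevel es := by
  simp [qOfE]

theorem qSum_append (xs ys : List (String × Int × Int)) : qSum (xs ++ ys) = qSum xs + qSum ys := by
  simp [qSum]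

theorem scanQ_append (xs ys : List (String × Int × Int)) (c : Int) :
    scanQ (xs ++ ys) c =
      match scanQ xs c with
      | some r => some r
      | none => scanQ ys (c - qSum xs) := by
  induction xs generalizing c with
  | nil => simp [scanQ, qSum]
  | cons x xs ih =>
    obtain ⟨cn, l, n⟩ := x
    simp only [List.cons_append, scanQ]
    split
    · rfl
    · rw [ih]
      have : c - n - qSum xs = c - qSum ((cn, l, n) :: xs) := by
        simp [qSum]; ring
      rw [this]

theorem scanQ_isSome (qs : List (String × Int × Int)) (c : Int) (h0 : qs ≠ []) (hc : c ≤ qSum qs) :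
    (scanQ qs c).isSome := by
  induction qs generalizing c with
  | nil => exact absurd rfl h0
  | cons q rest ih =>
    obtain ⟨cn, l, n⟩ := q
    simp only [scanQ]
    by_cases hcn : c ≤ n
    · simp [hcn]
    · rw [if_neg hcn]
      rcases rest with _ | ⟨r, rest⟩
      · exfalso; simp [qSum] at hc; omega
      · exact ih _ (by simp) (by simp [qSum] at hc ⊢; omega)

theorem runE_append (minLevel : Int) (xs ys : List (String × Option (List (Int × Int)))) (c : Int) :
    runE minLevel (xs ++ ys) c =
      match runE minLevel xs c with
      | .inl r => .inl r
      | .inr c' => runE minLevel ys c' := by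
  induction xs generalizing c with
  | nil => simp [runE]
  | cons x xs ih =>
    obtain ⟨fk, oi⟩ := x
    cases oi with
    | none => simp [runE]
    | some items =>
      simp only [List.cons_append, runE]
      cases scanQ (qOf fk minLevel items) c <;> simp [ih]

-- A-side: the inner items loop is scanQ on the filtered buckets
theorem aItems_eq (fk : String) (minLevel : Int) (items : List (Int × Int)) (c : Int) :
    aItems fk minLevel items c =
      match scanQ (qOf fk minLevel items) c with
      | some r => .inl r
      | none => .inr (c - qSum (qOf fk minLevel items)) := by
  induction items generalizing c with
  | nil => simp [aItems, qOf, scanQ, qSum]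
  | cons b rest ih =>
    obtain ⟨l, n⟩ := b
    by_cases h : minLevel ≤ l ∧ 0 < n
    · have h1 : aItems fk minLevel ((l, n) :: rest) c
          = if c ≤ n then .inl (fk, l) else aItems fk minLevel rest (c - n) := by
        simp [aItems, h]
      have hq : qOf fk minLevel ((l, n) :: rest) = (fk, l, n) :: qOf fk minLevel rest := by
        simp [qOf, h]
      rw [h1, hq]
      simp only [scanQ]
      by_cases hc : c ≤ n
      · simp [hc]
      · rw [if_neg hc, if_neg hc, ih]
        have harith : c - n - qSum (qOf fk minLevel rest) = c - qSum ((fk, l, n) :: qOf fk minLevel rest) := by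
          simp [qSum]; ring
        cases hs : scanQ (qOf fk minLevel rest) (c - n) <;> simp [harith]
    · have h1 : aItems fk minLevel ((l, n) :: rest) c = aItems fk minLevel rest c := by
        simp [aItems, h]
      have hq : qOf fk minLevel ((l, n) :: rest) = qOf fk minLevel rest := by
        simp [qOf, h]
      rw [h1, hq]
      exact ih c

-- A-side: the entries loop over one classDict is runE on its value stream
theorem aEntries_eq (fk : String) (minLevel : Int) (d : List (String × List (String × List (Int × Int)))) (c : Int) :
    aEntries fk minLevel d c = runE minLevel (d.map (fun p => (fk, p.2.lookup "Dict"))) c := by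
  induction d generalizing c with
  | nil => simp [aEntries, runE]
  | cons p rest ih =>
    obtain ⟨k, v⟩ := p
    cases hv : v.lookup "Dict" with
    | none => simp [aEntries, runE, hv]
    | some items =>
      simp only [aEntries, hv, aItems_eq, List.map_cons, runE]
      cases scanQ (qOf fk minLevel items) c <;> simp [ih]

-- A-side: the whole outer loop is runE on the flat value stream
theorem aOuter_eq (minLevel : Int) (cdl : List (List (String × List (String × List (Int × Int))))) (c : Int) :
    aOuter minLevel cdl c =
      match runE minLevel (evList cdl) c with
      | .inl r => r
      | .inr _ => none := by
  induction cdl generalizing c with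
  | nil => simp [aOuter, evList, runE]
  | cons d rest ih =>
    simp only [aOuter, aEntries_eq, evList, List.flatMap_cons, runE_append]
    cases runE minLevel (d.map (fun p => ((d.headD ("", [])).1, p.2.lookup "Dict"))) c with
    | inl r => simp
    | inr c' => simpa [evList] using ih c'

-- no qualifying bucket in a stream segment → it contributes no rows
theorem qOfE_eq_nil (minLevel : Int) (es : List (String × Option (List (Int × Int))))
    (h : ¬ ∃ e ∈ es, ∃ b ∈ e.2.getD [], minLevel ≤ b.1 ∧ 0 < b.2) :
    qOfE minLevel es = [] := by
  induction es with
  | nil => simp [qOfE]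
  | cons e rest ih =>
    have h1 : qOf e.1 minLevel (e.2.getD []) = [] := by
      simp only [qOf, List.map_eq_nil_iff, List.filter_eq_nil_iff]
      intro b hb hq
      exact h ⟨e, by simp, b, hb, by simpa using hq⟩
    have h2 : qOfE minLevel rest = [] := by
      apply ih
      rintro ⟨e', he', b, hb, hq⟩
      exact h ⟨e', by simp [he'], b, hb, hq⟩
    rw [qOfE_cons, h1, h2]
    simp

-- one qualifying bucket in a value → it contributes a row
theorem qOf_ne_nil (fk : String) (minLevel : Int) (items : List (Int × Int))
    (h : ∃ b ∈ items, minLevel ≤ b.1 ∧ 0 < b.2) : qOf fk minLevel items ≠ [] := by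
  obtain ⟨b, hb, hq⟩ := h
  simp only [qOf, ne_eq, List.map_eq_nil_iff, List.filter_eq_nil_iff]
  intro hall
  exact absurd hq (by simpa using hall b hb)

-- MAIN (A-side): on a stream whose clean prefix contains the citizen, A's run finds exactly the
-- first bucket of the full (missing-values-skipped) row list reaching the count
theorem runE_found (minLevel : Int) (es : List (String × Option (List (Int × Int)))) (c : Int)
    (hpre : ∃ i ∈ List.range es.length,
      (∀ e ∈ es.take (i + 1), e.2.isSome) ∧
      (∃ e ∈ es.take (i + 1), ∃ b ∈ e.2.getD [], minLevel ≤ b.1 ∧ 0 < b.2) ∧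
      c ≤ qSum (qOfE minLevel (es.take (i + 1)))) :
    ∃ r, runE minLevel es c = .inl (some r) ∧ scanQ (qOfE minLevel es) c = some r := by
  induction es generalizing c with
  | nil => obtain ⟨i, hi, -⟩ := hpre; simp at hi
  | cons e rest ih =>
    obtain ⟨i, hi, hclean, hqual, hsum⟩ := hpre
    obtain ⟨fk, oi⟩ := e
    have hilen : i < rest.length + 1 := by simpa [List.mem_range] using hi
    have hhead : oi.isSome := by
      have := hclean (fk, oi) (by simp [List.take_succ_cons])
      simpa using this
    obtain ⟨items, rfl⟩ := Option.isSome_iff_exists.mp hhead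
    have htake : ((fk, some items) :: rest).take (i + 1) = (fk, some items) :: rest.take i := by
      simp [List.take_succ_cons]
    have hsum' : c ≤ qSum (qOf fk minLevel items) + qSum (qOfE minLevel (rest.take i)) := by
      rw [htake, qOfE_cons, qSum_append] at hsum
      simpa using hsum
    cases hscan : scanQ (qOf fk minLevel items) c with
    | some r =>
      refine ⟨r, ?_, ?_⟩
      · simp [runE, hscan]
      · rw [qOfE_cons, scanQ_append]
        simp [hscan]
    | none =>
      by_cases hqrest : ∃ e ∈ rest.take i, ∃ b ∈ e.2.getD [], minLevel ≤ b.1 ∧ 0 < b.2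
      · obtain ⟨e', he', hb'⟩ := hqrest
        have hi0 : 0 < i := by
          cases i with
          | zero => simp at he'
          | succ k => omega
        have hidx : i - 1 + 1 = i := by omega
        have hrest : ∃ j ∈ List.range rest.length,
            (∀ e ∈ rest.take (j + 1), e.2.isSome) ∧
            (∃ e ∈ rest.take (j + 1), ∃ b ∈ e.2.getD [], minLevel ≤ b.1 ∧ 0 < b.2) ∧
            c - qSum (qOf fk minLevel items) ≤ qSum (qOfE minLevel (rest.take (j + 1))) := by
          refine ⟨i - 1, by simp only [List.mem_range]; omega, ?_, ?_, ?_⟩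
          · intro e he
            rw [hidx] at he
            exact hclean e (by rw [htake]; exact List.mem_cons_of_mem _ he)
          · rw [hidx]
            exact ⟨e', he', hb'⟩
          · rw [hidx]
            omega
        obtain ⟨r, hr1, hr2⟩ := ih _ hrest
        refine ⟨r, ?_, ?_⟩
        · simp [runE, hscan, hr1]
        · rw [qOfE_cons, scanQ_append]
          simpa [hscan] using hr2
      · exfalso
        have hrest0 : qOfE minLevel (rest.take i) = [] := qOfE_eq_nil _ _ hqrest
        have hne : qOf fk minLevel items ≠ [] := by
          apply qOf_ne_nil
          obtain ⟨e2, he2, b, hb, hq⟩ := hqual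
          rw [htake] at he2
          rcases List.mem_cons.mp he2 with he2 | he2
          · subst he2; exact ⟨b, by simpa using hb, hq⟩
          · exact absurd ⟨e2, he2, b, hb, hq⟩ hqrest
        have hle : c ≤ qSum (qOf fk minLevel items) := by
          rw [hrest0] at hsum'
          simpa [qSum] using hsum'
        have := scanQ_isSome _ _ hne hle
        simp [hscan] at this

-- B-side stage 1: the table built from bucket list qs starting at total t
def prefixTable : List (String × Int × Int) → Int → List (Int × String × Int)
  | [], _ => []
  | (cn, l, n) :: rest, t => (t + n, cn, l) :: prefixTable rest (t + n)

theorem prefixTable_append (xs ys : List (String × Int × Int)) (t : Int) :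
    prefixTable (xs ++ ys) t = prefixTable xs t ++ prefixTable ys (t + qSum xs) := by
  induction xs generalizing t with
  | nil => simp [prefixTable, qSum]
  | cons x xs ih =>
    obtain ⟨cn, l, n⟩ := x
    simp only [List.cons_append, prefixTable, ih]
    have : t + n + qSum xs = t + qSum ((cn, l, n) :: xs) := by simp [qSum]; ring
    rw [this]

theorem bItems_eq (cn : String) (minLevel : Int) (items : List (Int × Int)) (t : Int) (acc : List (Int × String × Int)) :
    bItems cn minLevel items (t, acc) =
      (t + qSum (qOf cn minLevel items), acc ++ prefixTable (qOf cn minLevel items) t) := by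
  induction items generalizing t acc with
  | nil => simp [bItems, qOf, qSum, prefixTable]
  | cons b rest ih =>
    obtain ⟨l, n⟩ := b
    by_cases h : minLevel ≤ l ∧ 0 < n
    · simp only [bItems, if_pos h, ih, qOf, List.filter_cons]
      rw [if_pos (by simpa using h)]
      simp only [List.map_cons, prefixTable, qSum, List.map_cons, List.sum_cons, Prod.mk.injEq]
      exact ⟨by ring, by simp⟩
    · simp only [bItems, if_neg h, ih, qOf, List.filter_cons]
      rw [if_neg (by simpa using h)]

theorem bEntries_eq (cn : String) (minLevel : Int) (d : List (String × List (String × List (Int × Int)))) (t : Int) (acc : List (Int × String × Int)) :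
    bEntries cn minLevel d (t, acc) =
      (t + qSum (qOfE minLevel (d.map (fun p => (cn, p.2.lookup "Dict")))),
       acc ++ prefixTable (qOfE minLevel (d.map (fun p => (cn, p.2.lookup "Dict")))) t) := by
  induction d generalizing t acc with
  | nil => simp [bEntries, qOfE, qSum, prefixTable]
  | cons p rest ih =>
    obtain ⟨k, v⟩ := p
    simp only [bEntries, bItems_eq, ih, List.map_cons, qOfE, List.flatMap_cons, prefixTable_append, qSum,
      List.map_append, List.sum_append, Prod.mk.injEq]
    exact ⟨by ring, by simp⟩

theorem bBuild_eq (minLevel : Int) (cdl : List (List (String × List (String × List (Int × Int))))) (t : Int) (acc : List (Int × String × Int)) :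
    bBuild minLevel cdl (t, acc) = (t + qSum (qOfE minLevel (evList cdl)), acc ++ prefixTable (qOfE minLevel (evList cdl)) t) := by
  induction cdl generalizing t acc with
  | nil => simp [bBuild, evList, qOfE, qSum, prefixTable]
  | cons d rest ih =>
    have hsplit : qOfE minLevel (evList (d :: rest))
        = qOfE minLevel (d.map (fun p => ((d.headD ("", [])).1, p.2.lookup "Dict"))) ++ qOfE minLevel (evList rest) := by
      simp [evList, qOfE, List.flatMap_cons, List.flatMap_append]
    simp only [bBuild, bEntries_eq, ih, hsplit, prefixTable_append,
      qSum, List.map_append, List.sum_append, Prod.mk.injEq]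
    exact ⟨by ring, by simp⟩

theorem bScan_prefixTable (qs : List (String × Int × Int)) (c t : Int) :
    bScan c (prefixTable qs t) = scanQ qs (c - t) := by
  induction qs generalizing c t with
  | nil => simp [prefixTable, bScan, scanQ]
  | cons q rest ih =>
    obtain ⟨cn, l, n⟩ := q
    simp only [prefixTable, bScan, scanQ]
    by_cases h : c ≤ t + n
    · rw [if_pos h, if_pos (by omega)]
    · rw [if_neg h, if_neg (by omega), ih]
      congr 1
      ring

-- every counted bucket has number > 0
theorem qOfE_pos (minLevel : Int) (es : List (String × Option (List (Int × Int)))) :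
    ∀ q ∈ qOfE minLevel es, 0 < q.2.2 := by
  intro q hq
  simp only [qOfE, List.mem_flatMap, qOf, List.mem_map, List.mem_filter] at hq
  obtain ⟨e, -, b, ⟨-, hb⟩, rfl⟩ := hq
  simpa using (of_decide_eq_true hb).2

-- every cumulative end of the table exceeds the starting total
theorem prefixTable_lt (qs : List (String × Int × Int)) (hq : ∀ q ∈ qs, 0 < q.2.2) (t : Int) :
    ∀ e ∈ prefixTable qs t, t < e.1 := by
  induction qs generalizing t with
  | nil => simp [prefixTable]
  | cons q rest ih =>
    obtain ⟨cn, l, n⟩ := q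
    have hn : 0 < n := by simpa using hq (cn, l, n) (by simp)
    intro e he
    rcases List.mem_cons.mp (by simpa [prefixTable] using he) with rfl | he
    · simpa using hn
    · have := ih (fun q hq' => hq q (by simp [hq'])) (t + n) e he
      omega

-- cumulative ends are strictly increasing
theorem prefixTable_pairwise (qs : List (String × Int × Int)) (hq : ∀ q ∈ qs, 0 < q.2.2) (t : Int) :
    (prefixTable qs t).Pairwise (fun a b => a.1 < b.1) := by
  induction qs generalizing t with
  | nil => simp [prefixTable]
  | cons q rest ih =>
    obtain ⟨cn, l, n⟩ := q
    refine List.Pairwise.cons ?_ (ih (fun q hq' => hq q (by simp [hq'])) (t + n))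
    intro e he
    exact prefixTable_lt rest (fun q hq' => hq q (by simp [hq'])) (t + n) e he

-- binary-search invariant: on a table with strictly increasing ends, the result r satisfies
-- "all ends before r are < c" and "the end at r (if any) is ≥ c"
theorem bSearch_spec (tbl : List (Int × String × Int)) (c : Int)
    (hmono : ∀ i j (_ : i < tbl.length) (hj : j < tbl.length), i < j → (tbl[i]'(by omega)).1 < (tbl[j]'hj).1) :
    ∀ n lo hi, hi - lo ≤ n → lo ≤ hi → hi ≤ tbl.length →
    (∀ i (h : i < tbl.length), i < lo → (tbl[i]'h).1 < c) →
    (∀ i (h : i < tbl.length), hi ≤ i → c ≤ (tbl[i]'h).1) →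
    (∀ i (h : i < tbl.length), i < bSearch tbl c lo hi → (tbl[i]'h).1 < c) ∧
    (∀ (h : bSearch tbl c lo hi < tbl.length), c ≤ (tbl[bSearch tbl c lo hi]'h).1) ∧
    bSearch tbl c lo hi ≤ tbl.length := by
  intro n
  induction n with
  | zero =>
    intro lo hi hn hlh hhl hlow hhigh
    have : lo = hi := by omega
    subst this
    rw [bSearch, dif_neg (by omega)]
    exact ⟨hlow, fun h => hhigh lo h (by omega), by omega⟩
  | succ m ih =>
    intro lo hi hn hlh hhl hlow hhigh
    by_cases hlt : lo < hi
    · rw [bSearch, dif_pos hlt]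
      have hmid : (lo + hi) / 2 < tbl.length := by omega
      rw [List.getD_eq_getElem tbl _ hmid]
      by_cases hc : (tbl[(lo + hi) / 2]'hmid).1 < c
      · rw [if_pos hc]
        refine ih ((lo + hi) / 2 + 1) hi (by omega) (by omega) hhl ?_ hhigh
        intro i h hi'
        rcases Nat.lt_or_ge i ((lo + hi) / 2) with h1 | h1
        · exact lt_of_lt_of_le (hmono i ((lo + hi) / 2) h hmid h1) (le_of_lt hc)
        · have : i = (lo + hi) / 2 := by omega
          subst this; exact hc
      · rw [if_neg hc]
        refine ih lo ((lo + hi) / 2) (by omega) (by omega) (by omega) hlow ?_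
        intro i h hi'
        have hmidc : c ≤ (tbl[(lo + hi) / 2]'hmid).1 := le_of_not_gt hc
        rcases Nat.eq_or_lt_of_le hi' with h2 | h2
        · exact h2 ▸ hmidc
        · exact le_of_lt (lt_of_le_of_lt hmidc (hmono _ i hmid h h2))
    · rw [bSearch, dif_neg hlt]
      exact ⟨hlow, fun h => hhigh lo h (by omega), by omega⟩

-- linear scan skips a prefix of too-small ends
theorem bScan_drop (tbl : List (Int × String × Int)) (c : Int) (k : Nat) (hk : k ≤ tbl.length)
    (h : ∀ i (hi : i < tbl.length), i < k → (tbl[i]'hi).1 < c) :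
    bScan c tbl = bScan c (tbl.drop k) := by
  induction tbl generalizing k with
  | nil => simp
  | cons x rest ih =>
    cases k with
    | zero => simp
    | succ m =>
      have hx : x.1 < c := by
        have := h 0 (by simp) (by omega)
        simpa using this
      obtain ⟨e1, cn, l⟩ := x
      rw [List.drop_succ_cons]
      have : bScan c ((e1, cn, l) :: rest) = bScan c rest := by
        simp only [bScan]
        rw [if_neg (by simpa using not_le_of_gt hx)]
      rw [this]
      refine ih m (by simpa using hk) ?_
      intro i hi him
      have := h (i + 1) (by simpa using Nat.succ_lt_succ hi) (by omega)
      simpa using this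

-- ===== VERDICT (by name: the statement is the Claim_ definition above) =====
theorem find_a_citizen_py_spec : Claim_equal_find_a_citizen_py := by
  intro cdl c m _ hpre
  unfold Spec_find_a_citizen_py
  obtain ⟨r, hr1, hr2⟩ := runE_found m (evList cdl) c hpre
  have hpos : ∀ q ∈ qOfE m (evList cdl), 0 < q.2.2 := qOfE_pos m (evList cdl)
  set tbl := prefixTable (qOfE m (evList cdl)) 0 with htbl
  have hrows : (bBuild m cdl (0, [])).2 = tbl := by rw [bBuild_eq]; simp [htbl]
  have hpw : tbl.Pairwise (fun a b => a.1 < b.1) := prefixTable_pairwise _ hpos 0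
  have hmono := List.pairwise_iff_getElem.mp hpw
  have hscan : bScan c tbl = some r := by
    rw [htbl, bScan_prefixTable]; simpa using hr2
  obtain ⟨hlow, hat, hle⟩ := bSearch_spec tbl c hmono tbl.length 0 tbl.length
    (by omega) (by omega) (le_refl _) (fun i h hi => by omega) (fun i h hi => by omega)
  have hdrop : bScan c tbl = bScan c (tbl.drop (bSearch tbl c 0 tbl.length)) :=
    bScan_drop tbl c _ hle hlow
  have hA : find_a_citizen_py cdl c m = r := by
    unfold find_a_citizen_py
    rw [aOuter_eq, hr1]
    rfl
  have hB : find_a_citizen_py_alt cdl c m = r := by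
    unfold find_a_citizen_py_alt
    simp only [hrows]
    by_cases hrl : bSearch tbl c 0 tbl.length < tbl.length
    · rcases hx : (tbl[bSearch tbl c 0 tbl.length]'hrl) with ⟨e1, cn, l⟩
      have hge : c ≤ e1 := by have := hat hrl; rw [hx] at this; exact this
      have hsome : bScan c (tbl.drop (bSearch tbl c 0 tbl.length)) = some (cn, l) := by
        rw [List.drop_eq_getElem_cons hrl, hx]
        simp [bScan, hge]
      have hr_eq : r = (cn, l) := Option.some.inj (hscan.symm.trans (hdrop.trans hsome))
      rw [if_pos hrl, List.getD_eq_getElem tbl _ hrl, hx, hr_eq]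
    · exfalso
      have h0 : tbl.drop (bSearch tbl c 0 tbl.length) = [] := List.drop_eq_nil_of_le (by omega)
      rw [h0, hscan] at hdrop
      simp [bScan] at hdrop
  rw [hA, hB]
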